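-- pv_equiv track=rewrite | github.com/laziz0609/python-list | task35.py | taqsim
-- ===== SOURCE A (Python) =====
-- def taqsim(royxat: list) -> list:
--     ret_list = [[], [], []]
--
--     for text in royxat:
--
--         if len(text) <= 3:
--             ret_list[0].append(text)
--
--         elif 4 <= len(text) <= 6:
--             ret_list[1].append(text)
--
--         if len(text) > 6:
--             ret_list[2].append(text)
--
--     return ret_list
-- ===== SOURCE B (Python) =====
-- def taqsim(royxat: list) -> list:
--     return [
--         [text for text in royxat if len(text) <= 3],
--         [text for text in royxat if 4 <= len(text) <= 6],
--         [text for text in royxat if len(text) > 6],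
--     ]
-- ===== Notes on version B (the rewrite author's own statement) =====
-- stated objective: idiomatic
-- what changed: Replaced the single accumulating loop with branches by three independent list comprehensions (three passes, one per bucket) returned directly as a list literal.
import Mathlib
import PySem

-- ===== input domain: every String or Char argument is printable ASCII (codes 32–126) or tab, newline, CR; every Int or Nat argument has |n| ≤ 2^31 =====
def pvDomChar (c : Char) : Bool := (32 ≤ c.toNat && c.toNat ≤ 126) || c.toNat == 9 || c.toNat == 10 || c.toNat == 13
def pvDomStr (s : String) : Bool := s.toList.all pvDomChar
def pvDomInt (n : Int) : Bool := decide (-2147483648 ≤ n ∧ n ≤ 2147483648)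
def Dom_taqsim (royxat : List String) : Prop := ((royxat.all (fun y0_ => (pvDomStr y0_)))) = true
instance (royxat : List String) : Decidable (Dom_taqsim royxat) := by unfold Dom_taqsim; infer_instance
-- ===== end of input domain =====

-- B replaces A's single accumulating loop by three independent filter passes (idiomatic decomposition).


-- ===== PORT A =====
-- one pass; state = the three buckets; branches in A's order (if / elif, then a separate if)
def taqsimStep (st : List String × List String × List String) (text : String) :
    List String × List String × List String :=
  let st1 :=
    if PySem.Str.len text ≤ 3 then (st.1 ++ [text], st.2.1, st.2.2)
    else if 4 ≤ PySem.Str.len text ∧ PySem.Str.len text ≤ 6 then (st.1, st.2.1 ++ [text], st.2.2)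
    else st
  if PySem.Str.len text > 6 then (st1.1, st1.2.1, st1.2.2 ++ [text]) else st1

def taqsim (royxat : List String) : List (List String) :=
  let st := royxat.foldl taqsimStep ([], [], [])
  [st.1, st.2.1, st.2.2]

-- ===== PORT B =====
def taqsim_alt (royxat : List String) : List (List String) :=
  [ royxat.filter (fun text => decide (PySem.Str.len text ≤ 3)),
    royxat.filter (fun text => decide (4 ≤ PySem.Str.len text ∧ PySem.Str.len text ≤ 6)),
    royxat.filter (fun text => decide (PySem.Str.len text > 6)) ]

-- ===== PRECONDITION & SPEC =====
def Spec_taqsim (royxat : List String) (out : List (List String)) : Prop := out = taqsim_alt royxat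
instance (royxat : List String) (out : List (List String)) : Decidable (Spec_taqsim royxat out) := by unfold Spec_taqsim; infer_instance

-- ===== CLAIM (what is proved, stated in full; the proofs are below) =====
def Claim_equal_taqsim : Prop := ∀ (royxat : List String), Dom_taqsim royxat → Spec_taqsim royxat (taqsim royxat)

-- ===== LEMMAS AND PROOFS =====

theorem taqsim_foldl (l : List String) (b0 b1 b2 : List String) :
    l.foldl taqsimStep (b0, b1, b2) =
      (b0 ++ l.filter (fun text => decide (PySem.Str.len text ≤ 3)),
       b1 ++ l.filter (fun text => decide (4 ≤ PySem.Str.len text ∧ PySem.Str.len text ≤ 6)),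
       b2 ++ l.filter (fun text => decide (PySem.Str.len text > 6))) := by
  induction l generalizing b0 b1 b2 with
  | nil => simp
  | cons t l ih =>
      simp only [List.foldl_cons, List.filter_cons]
      by_cases h0 : t.length ≤ 3
      · simp [taqsimStep, h0, ih, show ¬ (t.length > 6) by omega,
              show ¬ (4 ≤ t.length ∧ t.length ≤ 6) by omega]
      · by_cases h1 : 4 ≤ t.length ∧ t.length ≤ 6
        · simp [taqsimStep, h0, h1, ih, show ¬ (t.length > 6) by omega]
        · simp [taqsimStep, h0, h1, ih, show t.length > 6 by omega]
-- ===== VERDICT (by name: the statement is the Claim_ definition above) =====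
theorem taqsim_spec : Claim_equal_taqsim := by
  intro royxat _
  unfold Spec_taqsim taqsim taqsim_alt
  simp [taqsim_foldl]
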